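-- pv_equiv track=rewrite | github.com/DianeCM/laboratory_daa | count_dynamic.py | count_dynamic
-- ===== SOURCE A (Python) =====
-- def count_dynamic(T:str, A:str):
--     if len(T) > len(A): return 0
--     dp=[ [ [0 for i in range(len(A))] for i in range(len(T))] for i in range(len(T)) ]
--     i=len(T)-1
--     while i>=0:
--         for j in range(i,len(T)):
--             for k in range(len(A)):
--                 m=j-i
--                 if m > k:
--                     dp[i][j][k]=0
--                     continue
--                 if k==0:
--                     if A[0] == T[i]: dp[i][j][k]=2
--                     else: dp[i][j][k]=0
--                     continue
--                 if k >0 : dp[i][j][k]=dp[i][j][k-1]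
--                 if A[k] == T[i]:
--                     if m==0: dp[i][j][k]+=2**k
--                     elif i<len(T)-1 and k>0: dp[i][j][k]+=dp[i+1][j][k-1]
--                 if k==m and A[k] == T[j] and j>0 and k>0: dp[i][j][k]+=dp[i][j-1][k-1]
--         i-=1
--     return dp[0][len(T)-1][len(A)-1]
-- ===== SOURCE B (Python) =====
-- def count_dynamic(T: str, A: str):
--     if len(T) > len(A):
--         return 0
--     memo = {}
--
--     def f(i, j, k):
--         if j - i > k:
--             return 0
--         if k == 0:
--             return 2 if A[0] == T[i] else 0
--         key = (i, j, k)
--         if key in memo: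
--             return memo[key]
--         v = f(i, j, k - 1)
--         m = j - i
--         if A[k] == T[i]:
--             if m == 0:
--                 v += 2 ** k
--             elif i < len(T) - 1:
--                 v += f(i + 1, j, k - 1)
--         if k == m and A[k] == T[j] and j > 0:
--             v += f(i, j - 1, k - 1)
--         memo[key] = v
--         return v
--
--     return f(0, len(T) - 1, len(A) - 1)
-- ===== Notes on version B (the rewrite author's own statement) =====
-- stated objective: faster
-- what changed: Replaces the bottom-up 3D dp table filled by three nested loops with a top-down memoized recursion f(i,j,k) keyed on (i,j,k), which computes only the states reachable from (0,len(T)-1,len(A)-1) instead of the whole table.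
import Mathlib
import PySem

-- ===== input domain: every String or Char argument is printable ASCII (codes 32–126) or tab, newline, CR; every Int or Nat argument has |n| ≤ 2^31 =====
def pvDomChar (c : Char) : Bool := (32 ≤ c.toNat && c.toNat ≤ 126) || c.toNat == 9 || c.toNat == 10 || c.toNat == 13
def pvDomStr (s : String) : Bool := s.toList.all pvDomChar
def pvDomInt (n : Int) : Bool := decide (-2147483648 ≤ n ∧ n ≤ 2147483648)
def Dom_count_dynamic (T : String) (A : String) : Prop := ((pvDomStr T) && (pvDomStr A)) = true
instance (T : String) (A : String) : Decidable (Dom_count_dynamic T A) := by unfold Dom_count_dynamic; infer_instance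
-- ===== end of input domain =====

-- B replaces A's bottom-up 3D dp table (three nested loops) with a top-down memoized
-- recursion on (i,j,k); objective: alternative decomposition, same results.

-- ===== PORT A =====
-- dp is modelled as a total function Nat → Nat → Nat → Int (initially all 0, as in the
-- Python list-of-lists initialisation); pvUpd is the single-cell assignment dp[i][j][k]=v.
def pvUpd (dp : Nat → Nat → Nat → Int) (i j k : Nat) (v : Int) : Nat → Nat → Nat → Int :=
  fun i' j' k' => if i' = i ∧ j' = j ∧ k' = k then v else dp i' j' k'

-- the body of A's innermost loop: the value written into dp[i][j][k]
def pvBodyA (Tl Al : List Char) (i j k : Nat) (dp : Nat → Nat → Nat → Int) : Int :=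
  let m := j - i
  if m > k then 0
  else if k = 0 then (if Al.getD 0 ' ' = Tl.getD i ' ' then 2 else 0)
  else
    -- "if k > 0: dp[i][j][k] = dp[i][j][k-1]" (the initial cell value is 0)
    let v := if 0 < k then dp i j (k-1) else dp i j k
    let v := if Al.getD k ' ' = Tl.getD i ' ' then
               (if m = 0 then v + 2^k
                else if i < Tl.length - 1 ∧ 0 < k then v + dp (i+1) j (k-1) else v)
             else v
    if k = m ∧ Al.getD k ' ' = Tl.getD j ' ' ∧ 0 < j ∧ 0 < k then v + dp i (j-1) (k-1) else v

-- while i>=0 descending = fold over (range len(T)).reverse; range(i,len(T)) = range' i (len(T)-i);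
-- range(len(A)) = range len(A); indices are the non-negative Python ints of A's loops.
def count_dynamic (T : String) (A : String) : Int :=
  let Tl := T.toList
  let Al := A.toList
  if Tl.length > Al.length then 0
  else
    let dp : Nat → Nat → Nat → Int :=
      (List.range Tl.length).reverse.foldl (fun dp i =>
        (List.range' i (Tl.length - i)).foldl (fun dp j =>
          (List.range Al.length).foldl (fun dp k =>
            pvUpd dp i j k (pvBodyA Tl Al i j k dp)) dp) dp) (fun _ _ _ => 0)
    dp 0 (Tl.length - 1) (Al.length - 1)

-- ===== PORT B =====
-- f(i,j,k) with the memo dict threaded through; returns (value, memo).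
def pvFB (Tl Al : List Char) (i j : Nat) (k : Nat)
    (memo : PySem.Dict (Nat × Nat × Nat) Int) : Int × PySem.Dict (Nat × Nat × Nat) Int :=
  if j - i > k then (0, memo)
  else if _hk : k = 0 then ((if Al.getD 0 ' ' = Tl.getD i ' ' then 2 else 0), memo)
  else
    match memo.get? (i, j, k) with
    | some v => (v, memo)
    | none =>
      let p := pvFB Tl Al i j (k-1) memo
      let v := p.1
      let memo := p.2
      let m := j - i
      let q :=
        if Al.getD k ' ' = Tl.getD i ' ' then
          if m = 0 then (v + 2^k, memo)
          else if i < Tl.length - 1 then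
            let r := pvFB Tl Al (i+1) j (k-1) memo
            (v + r.1, r.2)
          else (v, memo)
        else (v, memo)
      let v := q.1
      let memo := q.2
      let q' :=
        if k = m ∧ Al.getD k ' ' = Tl.getD j ' ' ∧ 0 < j then
          let r := pvFB Tl Al i (j-1) (k-1) memo
          (v + r.1, r.2)
        else (v, memo)
      (q'.1, q'.2.insert (i, j, k) q'.1)
termination_by k
decreasing_by all_goals omega

def count_dynamic_alt (T : String) (A : String) : Int :=
  let Tl := T.toList
  let Al := A.toList
  if Tl.length > Al.length then 0
  else (pvFB Tl Al 0 (Tl.length - 1) (Al.length - 1) PySem.Dict.empty).1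

-- ===== PRECONDITION & SPEC =====
-- A raises IndexError on the final table lookup when T = "" (the dp table is empty); B raises
-- there too; those inputs are excluded.
def Pre_count_dynamic (T : String) (A : String) : Prop := T ≠ ""
instance (T : String) (A : String) : Decidable (Pre_count_dynamic T A) := by
  unfold Pre_count_dynamic; infer_instance
def pvWitness_count_dynamic : String × String := ("ab", "aab")

def Spec_count_dynamic (T : String) (A : String) (out : Int) : Prop := out = count_dynamic_alt T A
instance (T : String) (A : String) (out : Int) : Decidable (Spec_count_dynamic T A out) := by
  unfold Spec_count_dynamic; infer_instance

-- ===== CLAIM (what is proved, stated in full; the proofs are below) =====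
def Claim_equal_count_dynamic : Prop := ∀ (T : String) (A : String), Dom_count_dynamic T A → Pre_count_dynamic T A → Spec_count_dynamic T A (count_dynamic T A)

-- ===== LEMMAS AND PROOFS =====

-- the common recurrence both programs compute (proof-only reference function)
def pvG (Tl Al : List Char) (i j : Nat) (k : Nat) : Int :=
  if j - i > k then 0
  else if _hk : k = 0 then (if Al.getD 0 ' ' = Tl.getD i ' ' then 2 else 0)
  else
    let m := j - i
    let v := pvG Tl Al i j (k-1)
    let v := if Al.getD k ' ' = Tl.getD i ' ' then
               (if m = 0 then v + 2^k
                else if i < Tl.length - 1 then v + pvG Tl Al (i+1) j (k-1) else v)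
             else v
    if k = m ∧ Al.getD k ' ' = Tl.getD j ' ' ∧ 0 < j then v + pvG Tl Al i (j-1) (k-1) else v
termination_by k
decreasing_by all_goals omega

-- a memo is good if every stored entry is a value of pvG
def pvGood (Tl Al : List Char) (memo : PySem.Dict (Nat × Nat × Nat) Int) : Prop :=
  ∀ i j k v, memo.get? (i, j, k) = some v → v = pvG Tl Al i j k

theorem pvGood_insert (Tl Al : List Char) (memo : PySem.Dict (Nat × Nat × Nat) Int)
    (i j k : Nat) (v : Int) (h : pvGood Tl Al memo) (hv : v = pvG Tl Al i j k) :
    pvGood Tl Al (memo.insert (i, j, k) v) := by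
  intro i' j' k' w hw
  rw [PySem.Dict.get?_insert] at hw
  split_ifs at hw with he
  · injection he with h1 h2
    injection h2 with h3 h4
    subst h1; subst h3; subst h4
    cases hw
    exact hv
  · exact h _ _ _ _ hw

theorem pvFB_correct (Tl Al : List Char) (k i j : Nat)
    (memo : PySem.Dict (Nat × Nat × Nat) Int) (h : pvGood Tl Al memo) :
    (pvFB Tl Al i j k memo).1 = pvG Tl Al i j k ∧ pvGood Tl Al (pvFB Tl Al i j k memo).2 := by
  induction k generalizing i j memo with
  | zero =>
    rw [pvFB, pvG]
    by_cases h1 : j - i > 0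
    · rw [if_pos h1, if_pos h1]
      exact ⟨rfl, h⟩
    · rw [if_neg h1, if_neg h1, dif_pos rfl, dif_pos rfl]
      exact ⟨rfl, h⟩
  | succ n ih =>
    rw [pvFB]
    by_cases h1 : j - i > n + 1
    · rw [if_pos h1]
      rw [pvG, if_pos h1]
      exact ⟨rfl, h⟩
    · rw [if_neg h1, dif_neg (Nat.succ_ne_zero n)]
      have hG : pvG Tl Al i j (n + 1) =
          (if n + 1 = j - i ∧ Al.getD (n+1) ' ' = Tl.getD j ' ' ∧ 0 < j then
             (if Al.getD (n+1) ' ' = Tl.getD i ' ' then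
                (if j - i = 0 then pvG Tl Al i j n + 2^(n+1)
                 else if i < Tl.length - 1 then pvG Tl Al i j n + pvG Tl Al (i+1) j n
                 else pvG Tl Al i j n)
              else pvG Tl Al i j n) + pvG Tl Al i (j-1) n
           else
             (if Al.getD (n+1) ' ' = Tl.getD i ' ' then
                (if j - i = 0 then pvG Tl Al i j n + 2^(n+1)
                 else if i < Tl.length - 1 then pvG Tl Al i j n + pvG Tl Al (i+1) j n
                 else pvG Tl Al i j n)
              else pvG Tl Al i j n)) := by
        rw [pvG, if_neg h1, dif_neg (Nat.succ_ne_zero n)]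
        simp only [Nat.add_sub_cancel]
      cases hget : memo.get? (i, j, n + 1) with
      | some v =>
        simp only
        exact ⟨h i j (n+1) v hget, h⟩
      | none =>
        simp only [Nat.add_sub_cancel]
        obtain ⟨hp1, hp2⟩ := ih i j memo h
        have hr := ih (i+1) j (pvFB Tl Al i j n memo).2 hp2
        have hsP := ih i (j-1) (pvFB Tl Al i j n memo).2 hp2
        have hsR := ih i (j-1) (pvFB Tl Al (i+1) j n (pvFB Tl Al i j n memo).2).2 hr.2
        have key : ∀ (q' : Int × PySem.Dict (Nat × Nat × Nat) Int),
            q'.1 = pvG Tl Al i j (n+1) → pvGood Tl Al q'.2 →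
            ((q'.1, q'.2.insert (i, j, n+1) q'.1).1 = pvG Tl Al i j (n+1) ∧
             pvGood Tl Al (q'.1, q'.2.insert (i, j, n+1) q'.1).2) :=
          fun q' hq1 hq2 => ⟨hq1, pvGood_insert _ _ _ _ _ _ _ hq2 hq1⟩
        refine key _ ?_ ?_
        · rw [hG]
          split_ifs <;> simp only [hp1, hr.1, hsP.1, hsR.1]
        · split_ifs <;> first | exact hp2 | exact hr.2 | exact hsP.2 | exact hsR.2

-- proof-only views of A's three nested folds
def pvInnerN (Tl Al : List Char) (i j N : Nat) (dp : Nat → Nat → Nat → Int) : Nat → Nat → Nat → Int :=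
  (List.range N).foldl (fun dp k => pvUpd dp i j k (pvBodyA Tl Al i j k dp)) dp

def pvRowN (Tl Al : List Char) (i J : Nat) (dp : Nat → Nat → Nat → Int) : Nat → Nat → Nat → Int :=
  (List.range' i (J - i)).foldl (fun dp j => pvInnerN Tl Al i j Al.length dp) dp

def pvOuter (Tl Al : List Char) (I : Nat) (dp : Nat → Nat → Nat → Int) : Nat → Nat → Nat → Int :=
  (List.range I).reverse.foldl (fun dp i => pvRowN Tl Al i Tl.length dp) dp

theorem pvBody_eq (Tl Al : List Char) (i j k : Nat) (dp : Nat → Nat → Nat → Int)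
    (hij : i ≤ j)
    (h0 : k ≠ 0 → dp i j (k-1) = pvG Tl Al i j (k-1))
    (h1 : i < j → dp (i+1) j (k-1) = pvG Tl Al (i+1) j (k-1))
    (h2 : i < j → dp i (j-1) (k-1) = pvG Tl Al i (j-1) (k-1)) :
    pvBodyA Tl Al i j k dp = pvG Tl Al i j k := by
  rw [pvBodyA, pvG]
  by_cases hm : j - i > k
  · rw [if_pos hm, if_pos hm]
  · rw [if_neg hm, if_neg hm]
    by_cases hk : k = 0
    · subst hk
      rw [if_pos rfl, dif_pos rfl]
    · rw [if_neg hk, dif_neg hk]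
      have hkpos : 0 < k := Nat.pos_of_ne_zero hk
      simp only [hkpos, and_true, if_true]
      rw [h0 hk]
      by_cases c1 : Al.getD k ' ' = Tl.getD i ' '
      · rw [if_pos c1, if_pos c1]
        by_cases cm : j - i = 0
        · rw [if_pos cm, if_pos cm]
          by_cases c3 : k = j - i ∧ Al.getD k ' ' = Tl.getD j ' ' ∧ 0 < j
          · omega
          · rw [if_neg c3, if_neg c3]
        · rw [if_neg cm, if_neg cm]
          have hij' : i < j := by omega
          by_cases c2 : i < Tl.length - 1
          · rw [if_pos c2, if_pos c2, h1 hij']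
            by_cases c3 : k = j - i ∧ Al.getD k ' ' = Tl.getD j ' ' ∧ 0 < j
            · rw [if_pos c3, if_pos c3, h2 hij']
            · rw [if_neg c3, if_neg c3]
          · rw [if_neg c2, if_neg c2]
            by_cases c3 : k = j - i ∧ Al.getD k ' ' = Tl.getD j ' ' ∧ 0 < j
            · rw [if_pos c3, if_pos c3, h2 hij']
            · rw [if_neg c3, if_neg c3]
      · rw [if_neg c1, if_neg c1]
        by_cases c3 : k = j - i ∧ Al.getD k ' ' = Tl.getD j ' ' ∧ 0 < j
        · have hij' : i < j := by omega
          rw [if_pos c3, if_pos c3, h2 hij']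
        · rw [if_neg c3, if_neg c3]

theorem pvInner_correct (Tl Al : List Char) (i j N : Nat) (dp : Nat → Nat → Nat → Int)
    (hij : i ≤ j)
    (hN : N ≤ Al.length)
    (hup : i < j → ∀ k, k < Al.length → dp (i+1) j k = pvG Tl Al (i+1) j k)
    (hleft : i < j → ∀ k, k < Al.length → dp i (j-1) k = pvG Tl Al i (j-1) k) :
    (∀ k, k < N → pvInnerN Tl Al i j N dp i j k = pvG Tl Al i j k) ∧
    (∀ i' j' k', ¬ (i' = i ∧ j' = j) → pvInnerN Tl Al i j N dp i' j' k' = dp i' j' k') := by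
  induction N with
  | zero => exact ⟨fun k hk => absurd hk (Nat.not_lt_zero k), fun _ _ _ _ => rfl⟩
  | succ N ihN =>
    obtain ⟨ia, ib⟩ := ihN (by omega)
    have hstep : pvInnerN Tl Al i j (N+1) dp
        = pvUpd (pvInnerN Tl Al i j N dp) i j N (pvBodyA Tl Al i j N (pvInnerN Tl Al i j N dp)) := by
      rw [pvInnerN, List.range_succ, List.foldl_append]
      rfl
    constructor
    · intro k hk
      rw [hstep]
      by_cases hkN : k = N
      · subst hkN
        rw [pvUpd, if_pos ⟨rfl, rfl, rfl⟩]
        apply pvBody_eq Tl Al i j k _ hij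
        · intro hk0
          exact ia (k-1) (by omega)
        · intro hij'
          rw [ib (i+1) j (k-1) (by omega)]
          exact hup hij' (k-1) (by omega)
        · intro hij'
          rw [ib i (j-1) (k-1) (by omega)]
          exact hleft hij' (k-1) (by omega)
      · rw [pvUpd, if_neg (fun hc => hkN hc.2.2)]
        exact ia k (by omega)
    · intro i' j' k' hne
      rw [hstep, pvUpd, if_neg (fun hc => hne ⟨hc.1, hc.2.1⟩), ib i' j' k' hne]

theorem pvRow_correct (Tl Al : List Char) (i J : Nat) (dp : Nat → Nat → Nat → Int)
    (hrows : ∀ i' j k, i < i' → i' ≤ j → j < Tl.length → k < Al.length → dp i' j k = pvG Tl Al i' j k) :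
    J ≤ Tl.length →
    (∀ j k, i ≤ j → j < J → k < Al.length → pvRowN Tl Al i J dp i j k = pvG Tl Al i j k) ∧
    (∀ i' j' k', i' ≠ i → pvRowN Tl Al i J dp i' j' k' = dp i' j' k') := by
  induction J with
  | zero =>
    intro _
    constructor
    · exact fun j k h1 h2 => absurd h2 (Nat.not_lt_zero j)
    · intro i' j' k' _
      rw [pvRowN, Nat.zero_sub]
      rfl
  | succ J ihJ =>
    intro hJ1
    by_cases hJi : J < i
    · have he : J + 1 - i = 0 := by omega
      rw [pvRowN, he]
      exact ⟨fun j k h1 h2 _ => absurd (lt_of_le_of_lt h1 h2) (by omega), fun _ _ _ _ => rfl⟩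
    · obtain ⟨ra, rb⟩ := ihJ (by omega)
      have hstep : pvRowN Tl Al i (J+1) dp
          = pvInnerN Tl Al i J Al.length (pvRowN Tl Al i J dp) := by
        rw [pvRowN, pvRowN, show J + 1 - i = (J - i) + 1 by omega, List.range'_concat,
          List.foldl_append, show i + 1 * (J - i) = J by omega]
        rfl
      have hup : i < J → ∀ k, k < Al.length →
          pvRowN Tl Al i J dp (i+1) J k = pvG Tl Al (i+1) J k := by
        intro hij k hk
        rw [rb (i+1) J k (by omega)]
        exact hrows (i+1) J k (by omega) (by omega) (by omega) hk
      have hleft : i < J → ∀ k, k < Al.length →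
          pvRowN Tl Al i J dp i (J-1) k = pvG Tl Al i (J-1) k := by
        intro hij k hk
        exact ra (J-1) k (by omega) (by omega) hk
      obtain ⟨qa, qb⟩ := pvInner_correct Tl Al i J Al.length (pvRowN Tl Al i J dp)
        (by omega) le_rfl hup hleft
      constructor
      · intro j k h1 h2 hk
        rw [hstep]
        by_cases hjJ : j = J
        · subst hjJ
          exact qa k hk
        · rw [qb i j k (fun hc => hjJ hc.2)]
          exact ra j k h1 (by omega) hk
      · intro i' j' k' hne
        rw [hstep, qb i' j' k' (fun hc => hne hc.1), rb i' j' k' hne]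

theorem pvOuter_correct (Tl Al : List Char) (I : Nat) :
    ∀ dp : Nat → Nat → Nat → Int, I ≤ Tl.length →
    (∀ i' j k, I ≤ i' → i' ≤ j → j < Tl.length → k < Al.length → dp i' j k = pvG Tl Al i' j k) →
    ∀ i j k, i ≤ j → j < Tl.length → k < Al.length →
      pvOuter Tl Al I dp i j k = pvG Tl Al i j k := by
  induction I with
  | zero =>
    intro dp _ hrows i j k hij hj hk
    rw [pvOuter]
    exact hrows i j k (Nat.zero_le i) hij hj hk
  | succ I ihI =>
    intro dp hI hrows i j k hij hj hk
    have hstep : pvOuter Tl Al (I+1) dp = pvOuter Tl Al I (pvRowN Tl Al I Tl.length dp) := by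
      rw [pvOuter, pvOuter, List.range_succ, List.reverse_append, List.reverse_singleton]
      rfl
    obtain ⟨ra, rb⟩ := pvRow_correct Tl Al I Tl.length dp
      (fun i' j' k' h1 h2 h3 hk' => hrows i' j' k' (by omega) h2 h3 hk') le_rfl
    rw [hstep]
    refine ihI (pvRowN Tl Al I Tl.length dp) (by omega) ?_ i j k hij hj hk
    intro i' j' k' h1 h2 h3 hk'
    by_cases hiI : i' = I
    · subst hiI
      exact ra j' k' h2 h3 hk'
    · rw [rb i' j' k' hiI]
      exact hrows i' j' k' (by omega) h2 h3 hk'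

theorem countA_eq_g (T A : String)
    (hT : T.toList.length ≠ 0) (hle : ¬ T.toList.length > A.toList.length) :
    count_dynamic T A = pvG T.toList A.toList 0 (T.toList.length - 1) (A.toList.length - 1) := by
  have hfold : count_dynamic T A
      = pvOuter T.toList A.toList T.toList.length (fun _ _ _ => 0) 0
          (T.toList.length - 1) (A.toList.length - 1) := by
    rw [count_dynamic]
    rw [if_neg hle]
    rfl
  rw [hfold]
  exact pvOuter_correct T.toList A.toList T.toList.length (fun _ _ _ => 0) le_rfl
    (fun i' j k h1 h2 h3 _ => absurd (lt_of_le_of_lt h2 h3) (not_lt.mpr h1))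
    0 (T.toList.length - 1) (A.toList.length - 1) (Nat.zero_le _)
    (by omega) (by omega)

-- ===== VERDICT (by name: the statement is the Claim_ definition above) =====
theorem count_dynamic_spec : Claim_equal_count_dynamic := by
  intro T A _ hpre
  unfold Spec_count_dynamic
  have hT : T.toList.length ≠ 0 := by
    intro h
    exact hpre (String.toList_eq_nil_iff.mp (List.length_eq_zero_iff.mp h))
  by_cases hgt : T.toList.length > A.toList.length
  · simp only [count_dynamic, count_dynamic_alt, if_pos hgt]
  · rw [countA_eq_g T A hT hgt]
    simp only [count_dynamic_alt, if_neg hgt]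
    exact ((pvFB_correct T.toList A.toList (A.toList.length - 1) 0 (T.toList.length - 1)
      PySem.Dict.empty (by intro i j k v hv; simp [PySem.Dict.get?_empty] at hv)).1).symm
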